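-- pv_equiv track=rewrite | github.com/WPoelman/ud-boxer | ud_boxer/sbn_scope2.py | replace_with_last
-- ===== SOURCE A (Python) =====
-- def replace_with_last(nums):
--     result = []
--     start_index = 0
--     if len(nums)==0:
--         return nums
--     else:
--         for i in range(1, len(nums)):
--             if nums[i] != nums[i - 1] + 1:
--                 result.extend([nums[i - 1]] * (i - start_index))
--                 start_index = i
--
--         result.extend([nums[-1]] * (len(nums) - start_index))
--         return result
-- ===== SOURCE B (Python) =====
-- def replace_with_last(nums):
--     if len(nums) == 0:
--         return nums
--     n = len(nums)
--     out = [0] * n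
--     out[n - 1] = nums[n - 1]
--     for i in range(n - 2, -1, -1):
--         out[i] = nums[i] if nums[i + 1] != nums[i] + 1 else out[i + 1]
--     return out
-- ===== Notes on version B (the rewrite author's own statement) =====
-- stated objective: faster
-- what changed: A scans forward keeping a run start index and emitting each finished run as a replicated block via list.extend; B preallocates the output and fills it in one backward pass, propagating each run's last value leftward with a carry, avoiding the block-building extend/replicate work.
import Mathlib
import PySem

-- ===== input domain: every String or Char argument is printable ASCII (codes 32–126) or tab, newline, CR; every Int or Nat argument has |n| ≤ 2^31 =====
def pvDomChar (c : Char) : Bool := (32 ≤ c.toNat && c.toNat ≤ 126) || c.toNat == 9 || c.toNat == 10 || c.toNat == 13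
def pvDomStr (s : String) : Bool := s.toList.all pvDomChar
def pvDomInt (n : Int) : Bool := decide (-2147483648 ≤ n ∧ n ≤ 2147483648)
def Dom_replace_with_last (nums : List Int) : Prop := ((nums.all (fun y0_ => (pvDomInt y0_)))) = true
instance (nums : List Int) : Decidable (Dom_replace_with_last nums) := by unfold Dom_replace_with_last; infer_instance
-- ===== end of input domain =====

-- B replaces A's forward run-block emission by a single backward carry pass; same O(n) cost, different decomposition.

-- ===== PORT A =====
-- A's loop body (the code inside `for i in range(1, len(nums))`)
def rwl_stepA (nums : List Int) (s : List Int × Int) (i : Int) : List Int × Int :=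
  if PySem.List.pyGetD nums i 0 ≠ PySem.List.pyGetD nums (i - 1) 0 + 1 then
    (s.1 ++ List.replicate (i - s.2).toNat (PySem.List.pyGetD nums (i - 1) 0), i)
  else s

-- forward scan: emit each finished run as a replicated block of its last value
def replace_with_last (nums : List Int) : List Int :=
  if nums.length = 0 then nums
  else
    let st := (PySem.List.pyRange 1 (nums.length : Int) 1).foldl (rwl_stepA nums) ([], 0)
    st.1 ++ List.replicate ((nums.length : Int) - st.2).toNat (PySem.List.pyGetD nums (-1) 0)

-- ===== PORT B =====
-- backward fill: out[i] = nums[i] at a run end, else the value carried from out[i+1]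
def rwl_fill : List Int → List Int
  | [] => []
  | [x] => [x]
  | x :: y :: rest =>
      let out := rwl_fill (y :: rest)
      (if y ≠ x + 1 then x else out.headD 0) :: out

def replace_with_last_alt (nums : List Int) : List Int :=
  if nums.length = 0 then nums else rwl_fill nums

-- ===== PRECONDITION & SPEC =====
def Spec_replace_with_last (nums : List Int) (out : List Int) : Prop := out = replace_with_last_alt nums
instance (nums : List Int) (out : List Int) : Decidable (Spec_replace_with_last nums out) := by unfold Spec_replace_with_last; infer_instance

-- ===== CLAIM (what is proved, stated in full; the proofs are below) =====
def Claim_equal_replace_with_last : Prop := ∀ (nums : List Int), Dom_replace_with_last nums → Spec_replace_with_last nums (replace_with_last nums)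

-- ===== LEMMAS AND PROOFS =====

theorem rwl_getD_eq (xs : List Int) (i : Nat) (h : i < xs.length) : xs.getD i 0 = xs[i] := by
  simp [List.getD_eq_getElem?_getD, List.getElem?_eq_getElem h]

theorem rwl_headD_eq (xs : List Int) (h : xs ≠ []) : xs.headD 0 = xs[0]'(by cases xs <;> simp_all) := by
  cases xs with
  | nil => exact absurd rfl h
  | cons a l => rfl

theorem rwl_getLastD_eq (xs : List Int) (h : xs ≠ []) :
    xs.getLastD 0 = xs[xs.length - 1]'(by cases xs <;> simp_all) := by
  rw [List.getLastD_eq_getLast?, List.getLast?_eq_getElem?]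
  simp [List.getElem?_eq_getElem (show xs.length - 1 < xs.length by cases xs <;> simp_all)]

theorem rwl_fill_length (xs : List Int) : (rwl_fill xs).length = xs.length := by
  induction xs with
  | nil => rfl
  | cons x xs ih =>
    cases xs with
    | nil => rfl
    | cons y rest => simp [rwl_fill] at ih ⊢; omega

theorem rwl_fill_ne_nil (xs : List Int) (h : xs ≠ []) : rwl_fill xs ≠ [] := by
  have := rwl_fill_length xs
  intro hc
  rw [hc] at this
  cases xs <;> simp_all

-- a maximal run (each element is predecessor + 1) fills with its last value
theorem rwl_fill_run (xs : List Int) (h : xs.IsChain (fun a b => b = a + 1)) :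
    rwl_fill xs = List.replicate xs.length (xs.getLastD 0) := by
  induction xs with
  | nil => rfl
  | cons x xs ih =>
    cases xs with
    | nil => rfl
    | cons y rest =>
      rw [List.isChain_cons_cons] at h
      have hrec := ih h.2
      simp only [rwl_fill, hrec]
      simp [h.1, List.replicate_succ]

-- a break splits the fill
theorem rwl_fill_split (p q : List Int) (hp : p ≠ []) (hq : q ≠ [])
    (hbr : q.headD 0 ≠ p.getLastD 0 + 1) :
    rwl_fill (p ++ q) = rwl_fill p ++ rwl_fill q := by
  induction p with
  | nil => simp_all
  | cons x p' ih =>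
    cases p' with
    | nil =>
      cases q with
      | nil => simp_all
      | cons z q' =>
        have hb : z ≠ x + 1 := by simpa using hbr
        simp [rwl_fill, hb]
    | cons w p'' =>
      have hbr' : q.headD 0 ≠ (w :: p'').getLastD 0 + 1 := by
        simpa [List.getLastD_cons] using hbr
      have hrec := ih (by simp) hbr'
      have hne : rwl_fill (w :: p'') ≠ [] := rwl_fill_ne_nil _ (by simp)
      cases hfw : rwl_fill (w :: p'') with
      | nil => exact absurd hfw hne
      | cons a t =>
        have lhs : rwl_fill (x :: w :: (p'' ++ q)) =
            (if w ≠ x + 1 then x else ((a :: t) ++ rwl_fill q).headD 0) :: ((a :: t) ++ rwl_fill q) := by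
          rw [show rwl_fill (x :: w :: (p'' ++ q)) =
                (if w ≠ x + 1 then x else (rwl_fill (w :: (p'' ++ q))).headD 0) :: rwl_fill (w :: (p'' ++ q)) from rfl]
          rw [show w :: (p'' ++ q) = (w :: p'') ++ q from rfl, hrec, hfw]
        rw [List.cons_append, List.cons_append, lhs]
        rw [show rwl_fill (x :: w :: p'') =
              (if w ≠ x + 1 then x else (rwl_fill (w :: p'')).headD 0) :: rwl_fill (w :: p'') from rfl, hfw]
        simp

-- run/break segment lemma: the fill of a prefix decomposes at a break index s
theorem rwl_seg (nums : List Int) (s n : Nat) (hsn : s < n) (hn : n ≤ nums.length)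
    (hbr : s = 0 ∨ nums.getD s 0 ≠ nums.getD (s - 1) 0 + 1)
    (hrun : ∀ j : Nat, s < j → j < n → nums.getD j 0 = nums.getD (j - 1) 0 + 1) :
    rwl_fill (nums.take n) = rwl_fill (nums.take s) ++ List.replicate (n - s) (nums.getD (n - 1) 0) := by
  have hlen : (nums.take n).length = n := by simp [hn]
  have hseglen : ((nums.take n).drop s).length = n - s := by simp [hlen]
  have hsegne : (nums.take n).drop s ≠ [] := by
    apply List.ne_nil_of_length_pos; omega
  have hsegget : ∀ (j : Nat) (hj : j < n - s),
      ((nums.take n).drop s)[j]'(by omega) = nums[s + j]'(by omega) := by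
    intro j hj
    simp
  have hchain : ((nums.take n).drop s).IsChain (fun a b => b = a + 1) := by
    rw [List.isChain_iff_getElem]
    intro i hi
    rw [hseglen] at hi
    rw [hsegget i (by omega), hsegget (i + 1) (by omega)]
    have h1 := hrun (s + i + 1) (by omega) (by omega)
    rw [rwl_getD_eq nums (s + i + 1) (by omega), rwl_getD_eq nums (s + i + 1 - 1) (by omega)] at h1
    have e1 : s + (i + 1) = s + i + 1 := by omega
    have e2 : s + i + 1 - 1 = s + i := by omega
    rw [getElem_congr_idx e1, h1, getElem_congr_idx e2]
  have hlast : ((nums.take n).drop s).getLastD 0 = nums.getD (n - 1) 0 := by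
    rw [rwl_getLastD_eq _ hsegne, rwl_getD_eq nums (n - 1) (by omega)]
    rw [getElem_congr_idx (by omega : ((nums.take n).drop s).length - 1 = n - s - 1)]
    rw [hsegget (n - s - 1) (by omega), getElem_congr_idx (by omega : s + (n - s - 1) = n - 1)]
  have hfillseg : rwl_fill ((nums.take n).drop s) = List.replicate (n - s) (nums.getD (n - 1) 0) := by
    rw [rwl_fill_run _ hchain, hseglen, hlast]
  have hsplit_list : nums.take n = nums.take s ++ (nums.take n).drop s := by
    conv_lhs => rw [← List.take_append_drop s (nums.take n)]
    congr 1
    rw [List.take_take]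
    congr 1
    omega
  by_cases hs0 : s = 0
  · subst hs0
    simp only [List.drop_zero] at hfillseg
    simpa [rwl_fill] using hfillseg
  · have hbr' : nums.getD s 0 ≠ nums.getD (s - 1) 0 + 1 := hbr.resolve_left hs0
    have hpne : nums.take s ≠ [] := by
      apply List.ne_nil_of_length_pos
      rw [List.length_take]
      omega
    have hbreak2 : ((nums.take n).drop s).headD 0 ≠ (nums.take s).getLastD 0 + 1 := by
      rw [rwl_headD_eq _ hsegne, rwl_getLastD_eq _ hpne]
      rw [hsegget 0 (by omega), getElem_congr_idx (by omega : s + 0 = s)]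
      have hts : (nums.take s).length = s := by rw [List.length_take]; omega
      rw [getElem_congr_idx (by omega : (nums.take s).length - 1 = s - 1)]
      rw [rwl_getD_eq nums s (by omega), rwl_getD_eq nums (s - 1) (by omega)] at hbr'
      simpa using hbr'
    rw [hsplit_list, rwl_fill_split _ _ hpne hsegne hbreak2, hfillseg]

-- loop invariant of A's fold: after i = 1 .. n-1, the state is (fill of the emitted prefix, last break index)
theorem rwl_foldA_inv (nums : List Int) (n : Nat) (h1 : 1 ≤ n) (h2 : n ≤ nums.length) :
    ∃ s : Nat, ((PySem.List.pyRange 1 (n : Int) 1).foldl (rwl_stepA nums) ([], 0)) =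
        (rwl_fill (nums.take s), (s : Int)) ∧ s < n ∧
      (s = 0 ∨ nums.getD s 0 ≠ nums.getD (s - 1) 0 + 1) ∧
      (∀ j : Nat, s < j → j < n → nums.getD j 0 = nums.getD (j - 1) 0 + 1) := by
  induction n with
  | zero => omega
  | succ m ih =>
    by_cases hm : m = 0
    · subst hm
      refine ⟨0, ?_, by omega, Or.inl rfl, by omega⟩
      have h0 : PySem.List.pyRange 1 ((1 : Nat) : Int) 1 = [] := by
        rw [show ((1 : Nat) : Int) = 1 by norm_num]
        exact PySem.List.pyRange_one_eq_nil (by norm_num)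
      rw [h0]
      simp [rwl_fill]
    · have hm1 : 1 ≤ m := by omega
      obtain ⟨s, hst, hsn, hbr, hrun⟩ := ih hm1 (by omega)
      have hrange : PySem.List.pyRange 1 ((m + 1 : Nat) : Int) 1 =
          PySem.List.pyRange 1 (m : Int) 1 ++ [(m : Int)] := by
        push_cast
        exact PySem.List.pyRange_one_succ_right (by exact_mod_cast hm1)
      rw [hrange, List.foldl_append, hst]
      have hidx : ((m : Int) - 1) = ((m - 1 : Nat) : Int) := by push_cast [hm1]; omega
      by_cases hc : nums.getD m 0 ≠ nums.getD (m - 1) 0 + 1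
      · refine ⟨m, ?_, by omega, Or.inr hc, by omega⟩
        simp only [List.foldl_cons, List.foldl_nil, rwl_stepA, hidx, PySem.List.pyGetD_natCast]
        rw [if_pos hc]
        have ht : ((m : Int) - (s : Int)).toNat = m - s := by omega
        rw [ht, ← rwl_seg nums s m hsn (by omega) hbr hrun]
      · push Not at hc
        refine ⟨s, ?_, by omega, hbr, ?_⟩
        · simp only [List.foldl_cons, List.foldl_nil, rwl_stepA, hidx, PySem.List.pyGetD_natCast]
          rw [if_neg (by simpa using hc)]
        · intro j hj1 hj2
          by_cases hjm : j = m
          · subst hjm; exact hc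
          · exact hrun j hj1 (by omega)

-- ===== VERDICT (by name: the statement is the Claim_ definition above) =====
theorem replace_with_last_spec : Claim_equal_replace_with_last := by
  unfold Claim_equal_replace_with_last Spec_replace_with_last
  intro nums _
  by_cases hnil : nums.length = 0
  · simp [replace_with_last, replace_with_last_alt, hnil]
  · have hlen : 1 ≤ nums.length := by omega
    obtain ⟨s, hst, hsn, hbr, hrun⟩ := rwl_foldA_inv nums nums.length hlen le_rfl
    have hne : nums ≠ [] := by intro h; subst h; simp at hnil
    have hneg : PySem.List.pyGetD nums (-1) 0 = nums.getD (nums.length - 1) 0 := by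
      rw [PySem.List.pyGetD_neg_one nums 0 hne, rwl_getD_eq nums (nums.length - 1) (by omega),
        List.getLast_eq_getElem]
    have ht : ((nums.length : Int) - (s : Int)).toNat = nums.length - s := by omega
    have hseg := rwl_seg nums s nums.length hsn le_rfl hbr hrun
    rw [List.take_length] at hseg
    simp only [replace_with_last, replace_with_last_alt, if_neg hnil, hst]
    simp only [hneg]
    rw [ht, ← hseg]
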